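-- pv_equiv track=rewrite | github.com/hashdist/hashstack-old | builder/builder.py | system_lib
-- ===== SOURCE A (Python) =====
-- def system_lib(name):
--     if name == "":
--         return True
--     system_libs = [
--             "libm",
--             "libpthread",
--             "libdl",
--             "librt",
--             "libnsl",
--
--             # linux
--             "linux-vdso",
--
--             # gcc
--             "libstdc++",
--             "libgfortran",
--             "libquadmath",
--             "libgcc_s",
--
--             # libc
--             "libc",
--             "libutil",
--
--             # X11
--             "libX11",
--             "libXau",
--             "libXext",
--             "libxcb",
--             "libXdmcp",
--             ]
--
--     for lib in system_libs:
--         if name.startswith(lib + ".so"):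
--             return True
--     return False
-- ===== SOURCE B (Python) =====
-- _SYSTEM_LIBS = frozenset([
--     "libm", "libpthread", "libdl", "librt", "libnsl",
--     "linux-vdso",
--     "libstdc++", "libgfortran", "libquadmath", "libgcc_s",
--     "libc", "libutil",
--     "libX11", "libXau", "libXext", "libxcb", "libXdmcp",
-- ])
--
--
-- def system_lib(name):
--     if name == "":
--         return True
--     idx = name.find(".so")
--     if idx == -1:
--         return False
--     return name[:idx] in _SYSTEM_LIBS
-- ===== Notes on version B (the rewrite author's own statement) =====
-- stated objective: simpler
-- what changed: Instead of looping over the 17 library names testing name.startswith(lib + ".so"), B locates the first occurrence of ".so" with one find() and checks whether the prefix before it is in a frozenset of the names.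
import Mathlib
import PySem

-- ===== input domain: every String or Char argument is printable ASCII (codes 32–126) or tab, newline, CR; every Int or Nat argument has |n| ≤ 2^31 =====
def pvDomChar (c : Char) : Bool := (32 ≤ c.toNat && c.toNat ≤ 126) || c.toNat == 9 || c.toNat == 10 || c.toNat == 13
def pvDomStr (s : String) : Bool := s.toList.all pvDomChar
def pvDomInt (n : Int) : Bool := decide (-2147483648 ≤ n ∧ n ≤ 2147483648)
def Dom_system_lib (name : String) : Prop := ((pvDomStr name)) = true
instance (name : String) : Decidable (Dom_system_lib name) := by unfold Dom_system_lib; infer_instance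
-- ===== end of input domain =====

-- B replaces A's loop of startswith tests by one find(".so") plus one set lookup of the prefix (simpler; same observable behaviour).

-- ===== PORT A =====
-- the literal system_libs list from A
def systemLibsA : List String :=
  ["libm", "libpthread", "libdl", "librt", "libnsl",
   "linux-vdso",
   "libstdc++", "libgfortran", "libquadmath", "libgcc_s",
   "libc", "libutil",
   "libX11", "libXau", "libXext", "libxcb", "libXdmcp"]

-- 'for lib in system_libs: if name.startswith(lib + ".so"): return True' / 'return False'
def pvLoopA (name : List Char) : List String → Bool
  | [] => false
  | lib :: rest =>
      if PySem.Chars.startswith name (lib.toList ++ ".so".toList) then true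
      else pvLoopA name rest

def system_lib (name : String) : Bool :=
  if name = "" then true
  else pvLoopA name.toList systemLibsA

-- ===== PORT B =====
-- the frozenset _SYSTEM_LIBS from Source B
def pvSystemLibsSet : PySem.Set String :=
  PySem.Set.ofList
    ["libm", "libpthread", "libdl", "librt", "libnsl",
     "linux-vdso",
     "libstdc++", "libgfortran", "libquadmath", "libgcc_s",
     "libc", "libutil",
     "libX11", "libXau", "libXext", "libxcb", "libXdmcp"]

def system_lib_alt (name : String) : Bool :=
  if name = "" then true
  else
    let idx := PySem.Str.find name ".so"
    if idx = -1 then false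
    else PySem.Set.contains pvSystemLibsSet (PySem.Str.slice name none (some idx))

-- ===== PRECONDITION & SPEC =====
def Spec_system_lib (name : String) (out : Bool) : Prop := out = system_lib_alt name
instance (name : String) (out : Bool) : Decidable (Spec_system_lib name out) := by unfold Spec_system_lib; infer_instance

-- ===== CLAIM (what is proved, stated in full; the proofs are below) =====
def Claim_equal_system_lib : Prop := ∀ (name : String), Dom_system_lib name → Spec_system_lib name (system_lib name)

-- ===== LEMMAS AND PROOFS =====

-- A's loop is an 'any' over the list
theorem pvLoopA_eq_any (name : List Char) (libs : List String) :
    pvLoopA name libs = libs.any (fun lib => PySem.Chars.startswith name (lib.toList ++ ".so".toList)) := by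
  induction libs with
  | nil => rfl
  | cons lib rest ih =>
      simp only [pvLoopA]
      rw [List.any_cons, ← ih]
      cases PySem.Chars.startswith name (lib.toList ++ ".so".toList)
      · rw [if_neg (by simp), Bool.false_or]
      · rw [if_pos rfl, Bool.true_or]

-- none of the library names contains a '.'
theorem pvNoDot : ∀ lib ∈ systemLibsA, '.' ∉ lib.toList := by decide

-- the pointwise fact: given the first occurrence of ".so" in s is at index k,
-- s startswith (lib + ".so") iff lib is exactly the part of s before k
theorem pvStartswith_iff_take (s : List Char) (lib : String) (hdot : '.' ∉ lib.toList)
    (k : Nat) (hk : PySem.Chars.find s ".so".toList = (k : Int)) :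
    (lib.toList ++ ".so".toList <+: s) ↔ lib.toList = s.take k := by
  have hnn : (0:Int) ≤ PySem.Chars.find s ".so".toList := by rw [hk]; exact_mod_cast Nat.zero_le k
  obtain ⟨hpre, hmin⟩ := PySem.Chars.find_spec hnn
  rw [hk] at hpre hmin
  simp only [Int.toNat_natCast] at hpre hmin
  constructor
  · rintro ⟨t, ht⟩
    -- s = lib ++ ".so" ++ t
    have hL : ".so".toList <+: s.drop lib.toList.length := by
      refine ⟨t, ?_⟩
      rw [← ht, List.append_assoc, List.drop_left]
    -- minimality of k: k ≤ lib.length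
    have hkle : k ≤ lib.toList.length := by
      by_contra hlt
      exact hmin lib.toList.length (by omega) hL
    -- k < lib.length is impossible: s[k] would be '.', but s[k] = lib[k] and lib has no '.'
    have hkeq : k = lib.toList.length := by
      rcases Nat.lt_or_ge k lib.toList.length with hlt | hge
      · exfalso
        obtain ⟨u, hu⟩ := hpre
        have hsk : s[k]? = some '.' := by
          have hd : s.drop k = '.' :: ('s' :: ('o' :: u)) := by simpa using hu.symm
          have h1 : (s.drop k)[0]? = some '.' := by rw [hd]; rfl
          rwa [List.getElem?_drop, Nat.add_zero] at h1
        have hsk2 : s[k]? = lib.toList[k]? := by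
          rw [← ht, List.getElem?_append_left (by rw [List.length_append]; omega),
              List.getElem?_append_left (by omega)]
        have : lib.toList[k]? = some '.' := by rw [← hsk2, hsk]
        exact hdot (List.mem_of_getElem? this)
      · omega
    subst hkeq
    rw [← ht, List.append_assoc]
    exact (List.take_left' rfl).symm
  · intro htake
    obtain ⟨u, hu⟩ := hpre
    refine ⟨u, ?_⟩
    calc lib.toList ++ ".so".toList ++ u
        = s.take k ++ (".so".toList ++ u) := by rw [htake, List.append_assoc]
      _ = s.take k ++ s.drop k := by rw [hu]
      _ = s := List.take_append_drop k s

-- the found-case equivalence, over the whole list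
theorem pvAny_eq_mem (s : List Char) (k : Nat)
    (hk : PySem.Chars.find s ".so".toList = (k : Int)) :
    (systemLibsA.any (fun lib => PySem.Chars.startswith s (lib.toList ++ ".so".toList))) =
      systemLibsA.contains (String.ofList (s.take k)) := by
  rw [Bool.eq_iff_iff, List.any_eq_true, List.contains_eq_mem, decide_eq_true_iff]
  constructor
  · rintro ⟨lib, hmem, hsw⟩
    rw [PySem.Chars.startswith_iff] at hsw
    have htake := (pvStartswith_iff_take s lib (pvNoDot lib hmem) k hk).mp hsw
    have hlib : lib = String.ofList (s.take k) := by
      rw [← String.ofList_toList (s := lib), htake]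
    rwa [← hlib]
  · intro hmem
    refine ⟨String.ofList (s.take k), hmem, ?_⟩
    rw [PySem.Chars.startswith_iff]
    exact (pvStartswith_iff_take s (String.ofList (s.take k))
      (pvNoDot _ hmem) k hk).mpr String.toList_ofList

-- ===== VERDICT (by name: the statement is the Claim_ definition above) =====
theorem system_lib_spec : Claim_equal_system_lib := by
  intro name _
  unfold Spec_system_lib system_lib system_lib_alt
  by_cases h0 : name = ""
  · simp [h0]
  · simp only [h0, if_false]
    rw [pvLoopA_eq_any]
    rcases Int.lt_or_le (PySem.Str.find name ".so") 0 with hneg | hpos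
    · -- not found: find = -1, both sides false
      have hfind : PySem.Str.find name ".so" = -1 := by
        have := PySem.Chars.neg_one_le_find (s := name.toList) (sub := ".so".toList)
        rw [PySem.Str.find_eq] at *
        omega
      rw [PySem.Str.find_eq, PySem.Chars.find_eq_neg_one_iff] at hfind
      simp only [PySem.Str.find_eq]
      rw [if_pos (by rw [(PySem.Chars.find_eq_neg_one_iff _ _)]; exact hfind)]
      rw [List.any_eq_false]
      intro lib _
      cases hsw : PySem.Chars.startswith name.toList (lib.toList ++ ".so".toList)
      · simp
      · intro _
        rw [PySem.Chars.startswith_iff] at hsw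
        exact hfind ((List.suffix_append _ _).isInfix.trans hsw.isInfix)
    · -- found at k ≥ 0
      set i := PySem.Str.find name ".so" with hi
      have hne : ¬ i = -1 := by omega
      rw [if_neg hne]
      obtain ⟨k, hk⟩ : ∃ k : Nat, i = (k : Int) := ⟨i.toNat, (Int.toNat_of_nonneg hpos).symm⟩
      have hkC : PySem.Chars.find name.toList ".so".toList = (k : Int) := by
        rw [← PySem.Str.find_eq, ← hi, hk]
      rw [pvAny_eq_mem name.toList k hkC]
      -- B's side: the slice is the take, the frozenset is the list
      have hslice : PySem.Str.slice name none (some i) = String.ofList (name.toList.take k) := by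
        simp only [PySem.Str.slice, PySem.Chars.slice_eq_listSlice]
        rw [hk, PySem.List.slice_to _ (Int.natCast_nonneg k), Int.toNat_natCast]
      rw [hslice]
      have hset : pvSystemLibsSet = systemLibsA := by decide
      rw [hset]
      rfl
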